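-- pv_equiv track=rewrite | github.com/GalinaV-ai/KYC | agents/interviewer.py | _has_typos
-- ===== SOURCE A (Python) =====
-- def _has_typos(text: str) -> bool:
--     """Simple heuristic for typo detection."""
--     indicators = 0
--     if any(c * 2 in text.lower() for c in 'bcdfghjklmnpqrstvwxyz'
--            if c * 2 not in ('ll', 'ss', 'ff', 'tt', 'rr', 'nn', 'pp', 'mm', 'cc', 'dd', 'gg', 'bb', 'zz')):
--         indicators += 1
--     words = text.split()
--     if any(len(w) <= 2 and w.lower() not in (
--         'a', 'i', 'an', 'in', 'on', 'at', 'to', 'of', 'is', 'it', 'or', 'by',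
--         'do', 'we', 'no', 'so', 'if', 'up', 'my', 'he', 'me', 'us', 'am', 'be',
--         'as', 'ok', 'uk', 'go'
--     ) for w in words):
--         indicators += 1
--     return indicators >= 1
-- ===== SOURCE B (Python) =====
-- _UNCOMMON_DOUBLES = {'h', 'j', 'k', 'q', 'v', 'w', 'x', 'y'}
--
-- _SHORT_OK = {
--     'a', 'i', 'an', 'in', 'on', 'at', 'to', 'of', 'is', 'it', 'or', 'by',
--     'do', 'we', 'no', 'so', 'if', 'up', 'my', 'he', 'me', 'us', 'am', 'be',
--     'as', 'ok', 'uk', 'go'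
-- }
--
--
-- def _has_typos(text: str) -> bool:
--     """Simple heuristic for typo detection (single-pass double-consonant scan)."""
--     doubled = False
--     prev = None
--     for ch in text.lower():
--         if ch == prev and ch in _UNCOMMON_DOUBLES:
--             doubled = True
--             break
--         prev = ch
--     if doubled:
--         return True
--     return any(len(w) <= 2 and w.lower() not in _SHORT_OK for w in text.split())
-- ===== Notes on version B (the rewrite author's own statement) =====
-- stated objective: alternative
-- what changed: Replaces A's per-consonant doubled-substring searches of the lowered text with a single left-to-right pass tracking the previous character against a precomputed set of uncommon-double consonants; the short-word whitelist check is kept and combined with or.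
import Mathlib
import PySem

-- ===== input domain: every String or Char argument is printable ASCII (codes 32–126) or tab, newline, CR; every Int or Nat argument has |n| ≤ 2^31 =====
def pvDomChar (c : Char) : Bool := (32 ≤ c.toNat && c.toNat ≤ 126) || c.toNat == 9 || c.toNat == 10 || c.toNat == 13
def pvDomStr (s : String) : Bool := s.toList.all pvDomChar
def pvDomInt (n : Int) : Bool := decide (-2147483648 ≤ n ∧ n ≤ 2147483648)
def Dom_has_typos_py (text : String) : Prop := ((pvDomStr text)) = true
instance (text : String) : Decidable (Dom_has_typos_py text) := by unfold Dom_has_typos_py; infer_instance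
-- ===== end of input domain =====

-- B replaces A's repeated doubled-substring searches (one per consonant) by a single left-to-right scan
-- tracking the previous character against the precomputed uncommon-double set (objective: alternative).

-- ===== PORT A =====
-- literal transliteration of A: two indicator checks, counted, then `indicators >= 1`
def has_typos_py (text : String) : Bool :=
  let indicators : Int := 0
  let indicators :=
    if ("bcdfghjklmnpqrstvwxyz".toList).any (fun c =>
        !((["ll", "ss", "ff", "tt", "rr", "nn", "pp", "mm", "cc", "dd", "gg", "bb", "zz"]).contains
            (String.ofList [c, c]))
        && PySem.Str.isIn (String.ofList [c, c]) (PySem.Str.lower text))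
    then indicators + 1 else indicators
  let words := PySem.Str.split₀ text
  let indicators :=
    if words.any (fun w =>
        decide (PySem.Str.len w ≤ 2)
        && !(["a", "i", "an", "in", "on", "at", "to", "of", "is", "it", "or", "by",
              "do", "we", "no", "so", "if", "up", "my", "he", "me", "us", "am", "be",
              "as", "ok", "uk", "go"]).contains (PySem.Str.lower w))
    then indicators + 1 else indicators
  decide (indicators ≥ 1)

-- ===== PORT B =====
def pvUncommon : PySem.Set Char := PySem.Set.ofList ['h', 'j', 'k', 'q', 'v', 'w', 'x', 'y']

def pvShortOk : PySem.Set String := PySem.Set.ofList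
  ["a", "i", "an", "in", "on", "at", "to", "of", "is", "it", "or", "by",
   "do", "we", "no", "so", "if", "up", "my", "he", "me", "us", "am", "be",
   "as", "ok", "uk", "go"]

-- the for-loop of Source B: prev starts as None, flag set (and loop left) on an uncommon doubled char
def pvScan : Option Char → List Char → Bool
  | _, [] => false
  | prev, c :: rest =>
      if (some c == prev) && PySem.Set.contains pvUncommon c then true
      else pvScan (some c) rest

def has_typos_py_alt (text : String) : Bool :=
  let doubled := pvScan none (PySem.Str.lower text).toList
  if doubled then true
  else (PySem.Str.split₀ text).any (fun w =>
        decide (PySem.Str.len w ≤ 2) && !PySem.Set.contains pvShortOk (PySem.Str.lower w))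

-- ===== PRECONDITION & SPEC =====
def Spec_has_typos_py (text : String) (out : Bool) : Prop := out = has_typos_py_alt text
instance (text : String) (out : Bool) : Decidable (Spec_has_typos_py text out) := by unfold Spec_has_typos_py; infer_instance

-- ===== CLAIM (what is proved, stated in full; the proofs are below) =====
def Claim_equal_has_typos_py : Prop := ∀ (text : String), Dom_has_typos_py text → Spec_has_typos_py text (has_typos_py text)

-- ===== LEMMAS AND PROOFS =====

-- the scan (prev already set to p) finds exactly a doubled uncommon char inside p :: s
lemma pvScan_some_iff (p : Char) (s : List Char) :
    pvScan (some p) s = true ↔ ∃ c ∈ pvUncommon, [c, c] <:+: p :: s := by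
  induction s generalizing p with
  | nil =>
      simp only [pvScan]
      constructor
      · intro h; cases h
      · rintro ⟨c, -, h⟩
        have := h.length_le
        simp at this
  | cons b rest ih =>
      simp only [pvScan]
      split_ifs with h
      · simp only [Bool.and_eq_true, beq_iff_eq, Option.some.injEq] at h
        obtain ⟨hb, hc⟩ := h
        constructor
        · intro _
          exact ⟨b, (PySem.Set.contains_iff _ _).1 hc, hb ▸ ⟨[], rest, by simp⟩⟩
        · intro _; rfl
      · rw [ih b]
        constructor
        · rintro ⟨c, hcU, hinf⟩
          exact ⟨c, hcU, hinf.trans (List.suffix_cons p (b :: rest)).isInfix⟩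
        · rintro ⟨c, hcU, hinf⟩
          rcases List.infix_cons_iff.1 hinf with hpre | hinf'
          · obtain ⟨hcp, h2⟩ := List.cons_prefix_cons.1 hpre
            obtain ⟨hcb, -⟩ := List.cons_prefix_cons.1 h2
            exfalso
            apply h
            simp only [Bool.and_eq_true, beq_iff_eq, Option.some.injEq]
            exact ⟨hcb ▸ hcp, hcb ▸ (PySem.Set.contains_iff _ _).2 hcU⟩
          · exact ⟨c, hcU, hinf'⟩

lemma pvScan_none_iff (s : List Char) :
    pvScan none s = true ↔ ∃ c ∈ pvUncommon, [c, c] <:+: s := by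
  cases s with
  | nil =>
      simp only [pvScan]
      constructor
      · intro h; cases h
      · rintro ⟨c, -, h⟩
        have := h.length_le
        simp at this
  | cons b rest =>
      have hstep : pvScan none (b :: rest) = pvScan (some b) rest := by
        simp [pvScan]
      rw [hstep, pvScan_some_iff]

-- A's filtered any over the 21 consonants is exactly an uncommon doubled char occurring in the lowered text
lemma indicator1_eq (low : String) :
    (("bcdfghjklmnpqrstvwxyz".toList).any (fun c =>
        !((["ll", "ss", "ff", "tt", "rr", "nn", "pp", "mm", "cc", "dd", "gg", "bb", "zz"]).contains
            (String.ofList [c, c]))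
        && PySem.Str.isIn (String.ofList [c, c]) low))
      = pvScan none low.toList := by
  have hlist : "bcdfghjklmnpqrstvwxyz".toList
      = ['b','c','d','f','g','h','j','k','l','m','n','p','q','r','s','t','v','w','x','y','z'] := by
    decide
  rw [hlist, Bool.eq_iff_iff, pvScan_none_iff, List.any_eq_true]
  constructor
  · rintro ⟨c, hc, hcond⟩
    rw [Bool.and_eq_true, PySem.Str.isIn_iff_infix] at hcond
    obtain ⟨hex, hin⟩ := hcond
    fin_cases hc <;>
      first
        | exact absurd hex (by decide)
        | (refine ⟨_, ?_, by simpa using hin⟩; decide)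
  · rintro ⟨c, hcU, hinf⟩
    have hU : pvUncommon = ['h', 'j', 'k', 'q', 'v', 'w', 'x', 'y'] := by decide
    rw [hU] at hcU
    simp only [List.mem_cons, List.not_mem_nil, or_false] at hcU
    refine ⟨c, ?_, ?_⟩
    · rcases hcU with rfl | rfl | rfl | rfl | rfl | rfl | rfl | rfl <;> decide
    · rw [Bool.and_eq_true, PySem.Str.isIn_iff_infix]
      refine ⟨?_, by simpa using hinf⟩
      rcases hcU with rfl | rfl | rfl | rfl | rfl | rfl | rfl | rfl <;> decide

-- B's whitelist set, evaluated, is A's whitelist tuple (same strings, no duplicates)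
lemma shortOk_eq :
    pvShortOk = ["a", "i", "an", "in", "on", "at", "to", "of", "is", "it", "or", "by",
                 "do", "we", "no", "so", "if", "up", "my", "he", "me", "us", "am", "be",
                 "as", "ok", "uk", "go"] := by
  decide

theorem has_typos_py_spec : Claim_equal_has_typos_py := by
  intro text _
  unfold Spec_has_typos_py has_typos_py has_typos_py_alt
  simp only [indicator1_eq, PySem.Set.contains_eq_listContains, shortOk_eq]
  cases h1 : pvScan none (PySem.Str.lower text).toList <;>
    cases h2 : (PySem.Str.split₀ text).any (fun w =>
        decide (PySem.Str.len w ≤ 2)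
        && !(["a", "i", "an", "in", "on", "at", "to", "of", "is", "it", "or", "by",
              "do", "we", "no", "so", "if", "up", "my", "he", "me", "us", "am", "be",
              "as", "ok", "uk", "go"]).contains (PySem.Str.lower w)) <;>
    simp
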